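-- pv_equiv track=rewrite | github.com/fcassirer/lastpassExport | lpe.py | bw_card
-- ===== SOURCE A (Python) =====
-- lpmap_card = {
--   "Name on Card" :"cardholderName",
--   "Type" : "brand",
--   "Number" : "number",
--   "Expiration Month" : "expMonth",
--   "Expiration Year" : "expYear",
--   "Security Code" : "code"
-- }
--
-- def bw_card(ty, lpentry):
--   card = {}
--   for i in lpmap_card.values():
--     card[i] = None
--   for k in lpentry:
--     if k in lpmap_card.keys():
--       card[lpmap_card[k]] = lpentry[k] if lpentry[k] != "" else None
--
--   return card
-- ===== SOURCE B (Python) =====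
-- lpmap_card = {
--   "Name on Card" :"cardholderName",
--   "Type" : "brand",
--   "Number" : "number",
--   "Expiration Month" : "expMonth",
--   "Expiration Year" : "expYear",
--   "Security Code" : "code"
-- }
--
-- def bw_card(ty, lpentry):
--   # drive the result by the fixed mapping: one pass over the 6-entry table,
--   # looking each LastPass key up in lpentry ('' / missing -> None)
--   return {bw: (lpentry.get(lp, "") or None) for lp, bw in lpmap_card.items()}
-- ===== Notes on version B (the rewrite author's own statement) =====
-- stated objective: simpler
-- what changed: B replaces A's two passes (initialize every mapped Bitwarden key to None, then scan the input entry for mapped LastPass keys) with a single dict comprehension over the fixed 6-entry mapping table, looking each LastPass key up in lpentry with .get(lp, '') so missing or empty fields become None.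
import Mathlib
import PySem

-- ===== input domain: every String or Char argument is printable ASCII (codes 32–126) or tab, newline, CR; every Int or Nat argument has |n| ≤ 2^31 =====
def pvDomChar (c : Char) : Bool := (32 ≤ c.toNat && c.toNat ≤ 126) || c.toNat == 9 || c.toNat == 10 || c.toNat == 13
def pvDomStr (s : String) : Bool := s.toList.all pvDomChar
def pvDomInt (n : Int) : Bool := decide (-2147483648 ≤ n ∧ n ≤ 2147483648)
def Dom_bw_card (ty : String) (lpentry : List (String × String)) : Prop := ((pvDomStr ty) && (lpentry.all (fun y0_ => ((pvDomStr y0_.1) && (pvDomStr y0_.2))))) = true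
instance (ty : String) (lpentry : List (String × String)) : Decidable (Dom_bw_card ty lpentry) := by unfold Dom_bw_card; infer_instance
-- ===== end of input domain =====

-- B replaces A's two passes (initialise every mapped key to None, then scan the input for
-- mapped keys) by one pass over the fixed 6-entry table with a get-lookup into the input (simpler).

-- the module constant lpmap_card (shared by both Pythons)
def lpPairs : List (String × String) :=
  [("Name on Card", "cardholderName"), ("Type", "brand"), ("Number", "number"),
   ("Expiration Month", "expMonth"), ("Expiration Year", "expYear"), ("Security Code", "code")]
def lpmapCard : PySem.Dict String String := PySem.Dict.ofList lpPairs

-- ===== PORT A =====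
def bw_card (ty : String) (lpentry : List (String × String)) : List (String × Option String) :=
  let entry := PySem.Dict.ofList lpentry            -- the dict the caller passes
  let card := lpmapCard.values.foldl (fun d i => d.insert i (none : Option String)) PySem.Dict.empty
  let card := entry.keys.foldl (fun d k =>
      if lpmapCard.contains k then
        d.insert (lpmapCard.getD k "")
          (if entry.getD k "" ≠ "" then some (entry.getD k "") else none)
      else d) card
  card.items

-- ===== PORT B =====
def bw_card_alt (ty : String) (lpentry : List (String × String)) : List (String × Option String) :=
  let entry := PySem.Dict.ofList lpentry            -- the dict the caller passes
  lpPairs.map (fun p =>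
    (p.2, let v := entry.getD p.1 ""; if v ≠ "" then some v else none))

-- ===== PRECONDITION & SPEC =====
def Spec_bw_card (ty : String) (lpentry : List (String × String)) (out : List (String × Option String)) : Prop := out = bw_card_alt ty lpentry
instance (ty : String) (lpentry : List (String × String)) (out : List (String × Option String)) : Decidable (Spec_bw_card ty lpentry out) := by unfold Spec_bw_card; infer_instance

-- ===== CLAIM (what is proved, stated in full; the proofs are below) =====
def Claim_equal_bw_card : Prop := ∀ (ty : String) (lpentry : List (String × String)), Dom_bw_card ty lpentry → Spec_bw_card ty lpentry (bw_card ty lpentry)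

-- ===== LEMMAS AND PROOFS =====

-- the value A's update loop writes for an input key k
def gVal (entry : PySem.Dict String String) (k : String) : Option String :=
  if entry.getD k "" ≠ "" then some (entry.getD k "") else none

lemma lpmapCard_eq : lpmapCard = PySem.Dict.mk lpPairs := by decide

-- one step of A's update loop on a table-shaped dict: the slot of k (if mapped) is overwritten
lemma step_shape (entry : PySem.Dict String String) (h : String → Option String) (k : String) :
    (if lpmapCard.contains k then
        (PySem.Dict.mk (lpPairs.map (fun p => (p.2, h p.1)))).insert (lpmapCard.getD k "") (gVal entry k)
      else PySem.Dict.mk (lpPairs.map (fun p => (p.2, h p.1))))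
    = PySem.Dict.mk (lpPairs.map (fun p => (p.2, if p.1 = k then gVal entry p.1 else h p.1))) := by
  by_cases h1 : k = "Name on Card"
  · subst h1; simp [lpmapCard_eq, lpPairs, PySem.Dict.insert, PySem.Dict.contains, PySem.Dict.getD, PySem.Dict.get?]
  by_cases h2 : k = "Type"
  · subst h2; simp [lpmapCard_eq, lpPairs, PySem.Dict.insert, PySem.Dict.contains, PySem.Dict.getD, PySem.Dict.get?]
  by_cases h3 : k = "Number"
  · subst h3; simp [lpmapCard_eq, lpPairs, PySem.Dict.insert, PySem.Dict.contains, PySem.Dict.getD, PySem.Dict.get?]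
  by_cases h4 : k = "Expiration Month"
  · subst h4; simp [lpmapCard_eq, lpPairs, PySem.Dict.insert, PySem.Dict.contains, PySem.Dict.getD, PySem.Dict.get?]
  by_cases h5 : k = "Expiration Year"
  · subst h5; simp [lpmapCard_eq, lpPairs, PySem.Dict.insert, PySem.Dict.contains, PySem.Dict.getD, PySem.Dict.get?]
  by_cases h6 : k = "Security Code"
  · subst h6; simp [lpmapCard_eq, lpPairs, PySem.Dict.insert, PySem.Dict.contains, PySem.Dict.getD, PySem.Dict.get?]
  · simp [lpmapCard_eq, lpPairs, PySem.Dict.contains, beq_iff_eq,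
      Ne.symm h1, Ne.symm h2, Ne.symm h3, Ne.symm h4, Ne.symm h5, Ne.symm h6]

-- A's whole update loop on a table-shaped dict
lemma loop_shape (entry : PySem.Dict String String) (L : List String) (h : String → Option String) :
    (L.foldl (fun d k =>
        if lpmapCard.contains k then
          d.insert (lpmapCard.getD k "") (gVal entry k)
        else d) (PySem.Dict.mk (lpPairs.map (fun p => (p.2, h p.1)))))
    = PySem.Dict.mk (lpPairs.map (fun p => (p.2, if p.1 ∈ L then gVal entry p.1 else h p.1))) := by
  induction L generalizing h with
  | nil => simp
  | cons k L ih =>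
    rw [List.foldl_cons, step_shape entry h k]
    have hih := ih (fun x => if x = k then gVal entry x else h x)
    simp only [] at hih
    rw [hih]
    congr 1
    refine List.map_congr_left (fun p hp => ?_)
    by_cases hk : p.1 = k <;> by_cases hL : p.1 ∈ L <;> simp [hk, hL]

-- ===== VERDICT (by name: the statement is the Claim_ definition above) =====
theorem bw_card_spec : Claim_equal_bw_card := by
  intro ty lpentry _
  unfold Spec_bw_card
  simp only [bw_card, bw_card_alt]
  have h0 : (lpmapCard.values.foldl (fun d i => d.insert i (none : Option String)) PySem.Dict.empty)
      = PySem.Dict.mk (lpPairs.map (fun p => (p.2, (none : Option String)))) := by decide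
  rw [h0]
  have hloop := loop_shape (PySem.Dict.ofList lpentry) (PySem.Dict.ofList lpentry).keys
      (fun _ => (none : Option String))
  simp only [gVal] at hloop
  rw [hloop]
  refine List.map_congr_left (fun p hp => ?_)
  by_cases hmem : p.1 ∈ (PySem.Dict.ofList lpentry).keys
  · simp [hmem]
  · have hd : (PySem.Dict.ofList lpentry).getD p.1 "" = "" := by
      apply PySem.Dict.getD_of_not_contains
      rw [PySem.Dict.contains_eq_decide_mem_keys]
      simp [hmem]
    simp [hmem, hd]
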